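-- pv_equiv track=rewrite | github.com/kuku-forum/Algorithm-study | SWEA/D2/swea_1979.py | white_cnt
-- ===== SOURCE A (Python) =====
-- def white_cnt(board, K):
--     cnt = 0
--     for row in board:
--         row = ''.join(row)
--
--         for part in row.split('0'):
--             if len(part) == K:
--                 cnt += 1
--     return cnt
-- ===== SOURCE B (Python) =====
-- def white_cnt(board, K):
--     cnt = 0
--     for row in board:
--         run = 0
--         for ch in ''.join(row):
--             if ch == '0':
--                 if run == K:
--                     cnt += 1
--                 run = 0
--             else:
--                 run += 1
--         if run == K:
--             cnt += 1
--     return cnt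
-- ===== Notes on version B (the rewrite author's own statement) =====
-- stated objective: alternative
-- what changed: Replaces the split('0')-then-filter-by-length strategy with a one-pass run-length state machine over the joined row's characters, never materializing the list of segments.
import Mathlib
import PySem

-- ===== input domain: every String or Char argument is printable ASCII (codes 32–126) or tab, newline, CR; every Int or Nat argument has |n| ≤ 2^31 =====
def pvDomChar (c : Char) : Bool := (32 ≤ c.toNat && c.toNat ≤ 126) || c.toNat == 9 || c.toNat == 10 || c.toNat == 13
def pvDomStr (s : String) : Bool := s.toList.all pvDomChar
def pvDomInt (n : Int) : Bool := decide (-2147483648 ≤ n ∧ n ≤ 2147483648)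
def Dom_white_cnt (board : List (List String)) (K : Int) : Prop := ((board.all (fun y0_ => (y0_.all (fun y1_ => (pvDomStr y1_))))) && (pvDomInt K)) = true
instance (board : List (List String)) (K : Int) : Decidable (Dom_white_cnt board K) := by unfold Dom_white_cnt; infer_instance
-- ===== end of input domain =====

-- B replaces A's split('0')-then-filter-by-length with a one-pass run-length scan (alternative decomposition, same cost).

-- ===== PORT A =====
def white_cnt (board : List (List String)) (K : Int) : Int :=
  board.foldl (fun cnt row =>
    let rowS := PySem.Str.join "" row
    (PySem.Chars.splitOn rowS.toList ['0']).foldl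
      (fun cnt part => if PySem.Chars.len part = K then cnt + 1 else cnt) cnt) 0

-- ===== PORT B =====
def white_cnt_alt (board : List (List String)) (K : Int) : Int :=
  board.foldl (fun cnt row =>
    let s := PySem.Str.join "" row
    let p := s.toList.foldl
      (fun (p : Int × Int) ch =>
        if ch = '0' then ((if p.2 = K then p.1 + 1 else p.1), 0) else (p.1, p.2 + 1))
      (cnt, 0)
    if p.2 = K then p.1 + 1 else p.1) 0

-- ===== PRECONDITION & SPEC =====
def Spec_white_cnt (board : List (List String)) (K : Int) (out : Int) : Prop := out = white_cnt_alt board K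
instance (board : List (List String)) (K : Int) (out : Int) : Decidable (Spec_white_cnt board K out) := by unfold Spec_white_cnt; infer_instance

-- ===== CLAIM (what is proved, stated in full; the proofs are below) =====
def Claim_equal_white_cnt : Prop := ∀ (board : List (List String)) (K : Int), Dom_white_cnt board K → Spec_white_cnt board K (white_cnt board K)

-- ===== LEMMAS AND PROOFS =====

-- structural version of splitOn with separator '0'
def pvSplitAux : List Char → List Char → List (List Char)
  | [], cur => [cur.reverse]
  | c :: rest, cur => if c = '0' then cur.reverse :: pvSplitAux rest [] else pvSplitAux rest (c :: cur)

theorem pv_go_eq (l : List Char) : ∀ (fuel : Nat) (cur : List Char) (acc : List (List Char)),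
    l.length < fuel →
    PySem.Chars.splitOn.go ['0'] fuel l cur acc = acc.reverse ++ pvSplitAux l cur := by
  induction l with
  | nil =>
    intro fuel cur acc h
    match fuel with
    | fuel + 1 => simp [PySem.Chars.splitOn.go, pvSplitAux]
  | cons c rest ih =>
    intro fuel cur acc h
    match fuel with
    | fuel + 1 =>
      rw [PySem.Chars.splitOn.go]
      by_cases hc : c = '0'
      · subst hc
        simp only [List.isPrefixOf, beq_self_eq_true, Bool.true_and, if_true,
          List.length_cons, List.length_nil, List.drop_succ_cons, List.drop_zero]
        rw [ih fuel [] (cur.reverse :: acc) (by simpa using Nat.lt_of_succ_lt_succ h)]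
        simp [pvSplitAux]
      · have : (['0'].isPrefixOf (c :: rest)) = false := by
          simp [List.isPrefixOf]; exact fun hcc => absurd hcc.symm hc
        rw [this]
        simp only [Bool.false_eq_true, if_false]
        rw [ih fuel (c :: cur) acc (Nat.lt_of_succ_lt_succ h)]
        simp [pvSplitAux, hc]

theorem pv_splitOn_eq (l : List Char) :
    PySem.Chars.splitOn l ['0'] = pvSplitAux l [] := by
  rw [PySem.Chars.splitOn, pv_go_eq l (l.length + 1) [] [] (Nat.lt_succ_self _)]
  simp

theorem pv_scan_eq (K : Int) (l : List Char) : ∀ (cur : List Char) (cnt : Int),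
    (pvSplitAux l cur).foldl (fun cnt part => if PySem.Chars.len part = K then cnt + 1 else cnt) cnt
    = (let p := l.foldl
        (fun (p : Int × Int) ch =>
          if ch = '0' then ((if p.2 = K then p.1 + 1 else p.1), 0) else (p.1, p.2 + 1))
        (cnt, (cur.length : Int))
       if p.2 = K then p.1 + 1 else p.1) := by
  induction l with
  | nil =>
    intro cur cnt
    simp [pvSplitAux, PySem.Chars.len]
  | cons c rest ih =>
    intro cur cnt
    by_cases hc : c = '0'
    · subst hc
      simp only [pvSplitAux, if_true, List.foldl_cons]
      rw [ih [] (if (PySem.Chars.len cur.reverse) = K then cnt + 1 else cnt)]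
      simp [PySem.Chars.len]
    · simp only [pvSplitAux, hc, if_false, List.foldl_cons]
      rw [ih (c :: cur) cnt]
      simp only [List.length_cons]
      push_cast
      ring_nf

theorem pv_rows_eq (board : List (List String)) (K : Int) : ∀ (cnt : Int),
    board.foldl (fun cnt row =>
      let rowS := PySem.Str.join "" row
      (PySem.Chars.splitOn rowS.toList ['0']).foldl
        (fun cnt part => if PySem.Chars.len part = K then cnt + 1 else cnt) cnt) cnt
    = board.foldl (fun cnt row =>
      let s := PySem.Str.join "" row
      let p := s.toList.foldl
        (fun (p : Int × Int) ch =>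
          if ch = '0' then ((if p.2 = K then p.1 + 1 else p.1), 0) else (p.1, p.2 + 1))
        (cnt, 0)
      if p.2 = K then p.1 + 1 else p.1) cnt := by
  induction board with
  | nil => intro cnt; rfl
  | cons row rest ih =>
    intro cnt
    simp only [List.foldl_cons]
    rw [pv_splitOn_eq, pv_scan_eq K _ [] cnt, ih]
    simp

-- ===== VERDICT (by name: the statement is the Claim_ definition above) =====
theorem white_cnt_spec : Claim_equal_white_cnt := by
  intro board K _
  show white_cnt board K = white_cnt_alt board K
  unfold white_cnt white_cnt_alt
  exact pv_rows_eq board K 0
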